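-- pv_equiv track=rewrite | github.com/orannahum/Answers-of-codility-lessons-in-Python | Minimize the value.py | solution
-- ===== SOURCE A (Python) =====
-- def solution(A):
--         if len(A)>2:
--             for i in range(1,len(A)):
--                 A11=A[0:i]
--                 A12=A[i:len(A)]
--                 A21=A[0:i+1]
--                 A22=A[i+1:len(A)]
--                 if abs(sum(A12)-sum(A11))<abs(sum(A21)-sum(A22)):
--                     ANSWER=abs(sum(A12)-sum(A11))
--                     break
--         else:
--              ANSWER = abs(A[0]-A[1])
--         return(ANSWER)
-- ===== SOURCE B (Python) =====
-- def solution(A):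
--     n = len(A)
--     if n <= 2:
--         return abs(A[0] - A[1])
--     total = sum(A)
--     left = A[0]
--     cur = abs(total - 2 * left)      # |difference| at split index 1
--     for x in A[1:]:
--         left += x
--         nxt = abs(total - 2 * left)  # |difference| at the next split
--         if cur < nxt:
--             return cur
--         cur = nxt
--     return cur
-- ===== Notes on version B (the rewrite author's own statement) =====
-- stated objective: faster
-- what changed: B replaces A's per-split recomputation of four slices and their sums by a single pass that carries a running prefix sum, comparing each split's |difference| with the next in O(1).
-- crash fix: On lists shorter than 2 A raises IndexError (so does B); on lists of length > 2 whose split-difference sequence never strictly increases, A's loop ends without setting ANSWER and raises UnboundLocalError, while B returns the last split's difference; Pre_ excludes both. — e.g. on solution([5, -1, -1]): A raises UnboundLocalError, B returns 3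
import Mathlib
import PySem

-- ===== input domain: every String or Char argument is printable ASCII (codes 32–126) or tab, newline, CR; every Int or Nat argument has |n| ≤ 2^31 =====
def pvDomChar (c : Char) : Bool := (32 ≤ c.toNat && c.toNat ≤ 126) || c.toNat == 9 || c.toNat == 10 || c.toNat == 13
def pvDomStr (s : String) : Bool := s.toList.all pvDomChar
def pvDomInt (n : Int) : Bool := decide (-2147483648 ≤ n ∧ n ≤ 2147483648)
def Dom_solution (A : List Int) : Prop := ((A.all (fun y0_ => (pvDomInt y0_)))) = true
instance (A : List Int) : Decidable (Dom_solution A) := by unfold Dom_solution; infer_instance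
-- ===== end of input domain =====

-- B replaces A's quadratic re-summation of four slices per split by one running-prefix pass (asymptotically faster).

-- ===== PORT A =====
-- the for-loop of A: i runs from 1; ANSWER is unbound when the loop ends (A raises there; outside Pre_), port returns 0
def loopA (A : List Int) (i : Nat) : Int :=
  if _h : i < A.length then
    let A11 := PySem.List.slice A (some 0) (some (i : Int))
    let A12 := PySem.List.slice A (some (i : Int)) (some (A.length : Int))
    let A21 := PySem.List.slice A (some 0) (some ((i : Int) + 1))
    let A22 := PySem.List.slice A (some ((i : Int) + 1)) (some (A.length : Int))
    if |A12.sum - A11.sum| < |A21.sum - A22.sum| then |A12.sum - A11.sum|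
    else loopA A (i + 1)
  else 0
termination_by A.length - i

def solution (A : List Int) : Int :=
  if A.length > 2 then
    loopA A 1
  else
    match PySem.List.pyGet? A 0, PySem.List.pyGet? A 1 with
    | some a, some b => |a - b|
    | _, _ => 0  -- A raises IndexError here; outside Pre_

-- ===== PORT B =====
-- B's for-loop over A[1:], carrying the running prefix sum `left` and the current split value `cur`
def loopB (total left cur : Int) (rest : List Int) : Int :=
  match rest with
  | [] => cur
  | x :: rs =>
    let left' := left + x
    let nxt := |total - 2 * left'|
    if cur < nxt then cur else loopB total left' nxt rs

def solution_alt (A : List Int) : Int :=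
  if A.length ≤ 2 then
    match A with
    | a :: b :: _ => |a - b|
    | _ => 0  -- B raises IndexError here; outside Pre_
  else
    match A with
    | a :: rs => loopB A.sum a (|A.sum - 2 * a|) rs
    | [] => 0  -- unreachable (length > 2)

-- ===== PRECONDITION & SPEC =====
-- Pre_ excludes exactly the inputs where A raises: lists shorter than 2 (IndexError on A[0]/A[1]) and
-- lists of length > 2 whose split-difference sequence never strictly increases, where A's loop ends
-- without ever setting ANSWER (UnboundLocalError).
def Pre_solution (A : List Int) : Prop :=
  2 ≤ A.length ∧
  (2 < A.length → ∃ i < A.length, 1 ≤ i ∧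
    |A.sum - 2 * (A.take i).sum| < |A.sum - 2 * (A.take (i + 1)).sum|)
instance (A : List Int) : Decidable (Pre_solution A) := by unfold Pre_solution; infer_instance
def pvWitness_solution : List Int := [3, 1, 2, 4, 3]

-- On lists of length > 2 with no strictly increasing step in the split-difference sequence, A raises
-- UnboundLocalError while B returns the last split's difference |sum A|-style value.
def Raises_solution (A : List Int) : Prop :=
  2 < A.length ∧
  ∀ i < A.length, 1 ≤ i →
    ¬ |A.sum - 2 * (A.take i).sum| < |A.sum - 2 * (A.take (i + 1)).sum|
instance (A : List Int) : Decidable (Raises_solution A) := by unfold Raises_solution; infer_instance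
def pvRaiseWitness_solution : List Int := [5, -1, -1]
def pvRaiseWitnessOut_solution : Int := 3

def Spec_solution (A : List Int) (out : Int) : Prop := out = solution_alt A
instance (A : List Int) (out : Int) : Decidable (Spec_solution A out) := by unfold Spec_solution; infer_instance

-- ===== CLAIM (what is proved, stated in full; the proofs are below) =====
def Claim_equal_solution : Prop := ∀ (A : List Int), Dom_solution A → Pre_solution A → Spec_solution A (solution A)
def Claim_raises_solution : Prop := (∀ (A : List Int), Dom_solution A → Raises_solution A → ¬ Pre_solution A) ∧ (Dom_solution (pvRaiseWitness_solution) ∧ Raises_solution (pvRaiseWitness_solution) ∧ solution_alt (pvRaiseWitness_solution) = pvRaiseWitnessOut_solution)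

-- ===== LEMMAS AND PROOFS =====

-- split value at index i
def fval (A : List Int) (i : Nat) : Int := |A.sum - 2 * (A.take i).sum|

lemma sum_slice_to (A : List Int) (i : Nat) :
    (PySem.List.slice A (some 0) (some (i : Int))).sum = (A.take i).sum := by
  simp [PySem.List.slice_zero_start, PySem.List.slice_to_natCast]

lemma sum_slice_from (A : List Int) (i : Nat) :
    (PySem.List.slice A (some (i : Int)) (some (A.length : Int))).sum
      = A.sum - (A.take i).sum := by
  have h : PySem.List.slice A (some (i : Int)) (some (A.length : Int))
      = (A.drop i).take (A.length - i) := PySem.List.slice_natCast A i A.length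
  rw [h]
  have : (A.drop i).take (A.length - i) = A.drop i := by
    apply List.take_of_length_le; simp
  rw [this]
  have := List.take_append_drop i A
  have hs : (A.take i).sum + (A.drop i).sum = A.sum := by
    conv_rhs => rw [← this]
    rw [List.sum_append]
  omega

lemma take_succ_sum (A : List Int) (i : Nat) (h : i < A.length) :
    (A.take (i + 1)).sum = (A.take i).sum + A[i] := by
  rw [List.sum_take_succ]

lemma loopA_cond (A : List Int) (i : Nat) :
    |(PySem.List.slice A (some (i : Int)) (some (A.length : Int))).sum
       - (PySem.List.slice A (some 0) (some (i : Int))).sum| = fval A i := by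
  rw [sum_slice_from, sum_slice_to, fval]
  have : A.sum - (A.take i).sum - (A.take i).sum = A.sum - 2 * (A.take i).sum := by ring
  rw [this]

lemma loopA_cond' (A : List Int) (i : Nat) :
    |(PySem.List.slice A (some 0) (some ((i : Int) + 1))).sum
       - (PySem.List.slice A (some ((i : Int) + 1)) (some (A.length : Int))).sum|
      = fval A (i + 1) := by
  have h1 : ((i : Int) + 1) = ((i + 1 : Nat) : Int) := by push_cast; ring
  rw [h1, sum_slice_from, sum_slice_to, fval]
  have : (A.take (i + 1)).sum - (A.sum - (A.take (i + 1)).sum)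
      = -(A.sum - 2 * (A.take (i + 1)).sum) := by ring
  rw [this, abs_neg]

lemma loopA_eq_loopB (A : List Int) (i : Nat)
    (hex : ∃ j, i ≤ j ∧ j < A.length ∧ fval A j < fval A (j + 1)) :
    loopA A i = loopB A.sum (A.take i).sum (fval A i) (A.drop i) := by
  obtain ⟨j, hij, hjn, hdes⟩ := hex
  induction hn : A.length - i generalizing i with
  | zero =>
    exact absurd hjn (by omega)
  | succ m ih =>
    have hi : i < A.length := by omega
    rw [loopA]
    simp only [hi, dif_pos]
    rw [loopA_cond, loopA_cond']
    have hdrop : A.drop i = A[i] :: A.drop (i + 1) := List.drop_eq_getElem_cons hi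
    rw [hdrop, loopB]
    have hleft : (A.take i).sum + A[i] = (A.take (i + 1)).sum :=
      (take_succ_sum A i hi).symm
    rw [hleft]
    have hnxt : |A.sum - 2 * (A.take (i + 1)).sum| = fval A (i + 1) := rfl
    rw [hnxt]
    by_cases hc : fval A i < fval A (i + 1)
    · rw [if_pos hc, if_pos hc]
    · rw [if_neg hc, if_neg hc]
      have hij' : i + 1 ≤ j := by
        rcases Nat.lt_or_ge i j with h | h
        · omega
        · exfalso; have : i = j := by omega
          exact hc (this ▸ hdes)
      exact ih (i + 1) hij' (by omega)

lemma loopB_fval (A : List Int) (a : Int) (rs : List Int) (h : A = a :: rs) :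
    fval A 1 = |A.sum - 2 * a| := by
  subst h; simp [fval]

theorem solution_spec : Claim_equal_solution := by
  intro A _hdom hpre
  unfold Spec_solution
  obtain ⟨hlen, hex⟩ := hpre
  by_cases h2 : 2 < A.length
  · -- length > 2
    obtain ⟨a, rs, hA⟩ : ∃ a rs, A = a :: rs := by
      cases A with
      | nil => simp at hlen
      | cons a rs => exact ⟨a, rs, rfl⟩
    obtain ⟨i, hin, hi1, hdes⟩ := hex h2
    unfold solution solution_alt
    simp only [h2, if_pos]
    have := loopA_eq_loopB A 1 ⟨i, hi1, hin, hdes⟩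
    rw [this]
    have h1 : (A.take 1).sum = a := by rw [hA]; simp
    have h2' : fval A 1 = |A.sum - 2 * a| := loopB_fval A a rs hA
    have h3 : A.drop 1 = rs := by rw [hA]; simp
    rw [h1, h2', h3, hA]
    rw [if_neg (show ¬ ((a :: rs).length ≤ 2) by rw [← hA]; omega)]
  · -- length = 2
    have hlen2 : A.length = 2 := by omega
    obtain ⟨a, b, hA⟩ : ∃ a b, A = [a, b] := by
      match A, hlen2 with
      | [a, b], _ => exact ⟨a, b, rfl⟩
    subst hA
    unfold solution solution_alt
    simp [PySem.List.pyGet?, PySem.List.pyIdx?]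

-- ===== VERDICT (by name: the statement is the Claim_ definition above) =====
theorem solution_raises : Claim_raises_solution := by
  unfold Claim_raises_solution
  constructor
  · intro A _ ⟨h2, hall⟩ ⟨_, hex⟩
    obtain ⟨i, hin, hi1, hdes⟩ := hex h2
    exact hall i hin hi1 hdes
  · exact ⟨by decide, by decide, by decide⟩

-- self-check: both delivered claims hold together
theorem solution_claims_ok : Claim_equal_solution ∧ Claim_raises_solution :=
  ⟨solution_spec, solution_raises⟩
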